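-- pv_equiv track=rewrite | github.com/trykvi/advent-of-code | AoC-2024/day21.py | find_permutations_from
-- ===== SOURCE A (Python) =====
-- def find_permutations_from(i, segmented_paths):
--     if(i == len(segmented_paths) - 1):
--         return segmented_paths[i]
--     else:
--         result = []
--         next_result = find_permutations_from(i+1, segmented_paths)
--         for segment in segmented_paths[i]:
--             for combined_segment in next_result:
--                 result.append(segment + combined_segment)
--
--         return result
-- ===== SOURCE B (Python) =====
-- def find_permutations_from(i, segmented_paths):
--     result = segmented_paths[-1]
--     for j in range(len(segmented_paths) - 2, i - 1, -1):
--         result = [seg + c for seg in segmented_paths[j] for c in result]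
--     return result
-- ===== Notes on version B (the rewrite author's own statement) =====
-- stated objective: alternative
-- what changed: Replaced the linear recursion (recurse on i+1, then nested append loops) by an iterative backward fold: start from the last segment list and prepend each earlier segment list via a product comprehension.
import Mathlib
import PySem

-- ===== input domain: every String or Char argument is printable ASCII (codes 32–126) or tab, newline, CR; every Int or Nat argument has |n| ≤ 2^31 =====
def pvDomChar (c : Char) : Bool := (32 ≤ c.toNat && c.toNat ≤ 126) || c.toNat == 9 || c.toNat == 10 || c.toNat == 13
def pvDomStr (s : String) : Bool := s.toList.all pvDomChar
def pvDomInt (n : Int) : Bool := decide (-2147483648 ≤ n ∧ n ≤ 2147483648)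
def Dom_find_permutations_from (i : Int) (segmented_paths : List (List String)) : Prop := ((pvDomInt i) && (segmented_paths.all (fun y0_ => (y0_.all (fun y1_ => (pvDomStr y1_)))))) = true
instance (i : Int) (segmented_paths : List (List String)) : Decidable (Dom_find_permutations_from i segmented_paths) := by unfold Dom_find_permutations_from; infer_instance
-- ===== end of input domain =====

-- B replaces A's linear recursion by an iterative backward fold over the segment lists (objective: alternative, same cost).

-- ===== PORT A =====
-- Literal port of A's recursion. For i > len-1 the Python recurses forever (RecursionError);
-- those inputs are excluded by Pre_, and the port returns [] there to be total.
def find_permutations_from (i : Int) (segmented_paths : List (List String)) : List String :=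
  if i = (segmented_paths.length : Int) - 1 then
    (PySem.List.pyGet? segmented_paths i).getD []   -- IndexError impossible under Pre_
  else if i < (segmented_paths.length : Int) - 1 then
    let next_result := find_permutations_from (i + 1) segmented_paths
    ((PySem.List.pyGet? segmented_paths i).getD []).foldl
      (fun result segment =>
        next_result.foldl (fun result combined_segment => result ++ [segment ++ combined_segment]) result)
      []
  else []   -- Python A diverges here; outside Pre_
termination_by ((segmented_paths.length : Int) - 1 - i).toNat
decreasing_by omega

-- ===== PORT B =====
def find_permutations_from_alt (i : Int) (segmented_paths : List (List String)) : List String :=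
  (PySem.List.pyRange ((segmented_paths.length : Int) - 2) (i - 1) (-1)).foldl
    (fun result j =>
      ((PySem.List.pyGet? segmented_paths j).getD []).flatMap
        (fun seg => result.map (fun c => seg ++ c)))
    ((PySem.List.pyGet? segmented_paths (-1)).getD [])

-- ===== PRECONDITION & SPEC =====
-- Pre_ excludes exactly the inputs where Python A raises: i ≥ len (infinite recursion → RecursionError)
-- and i < -len, including the empty list (IndexError).
def Pre_find_permutations_from (i : Int) (segmented_paths : List (List String)) : Prop :=
  -(segmented_paths.length : Int) ≤ i ∧ i < (segmented_paths.length : Int)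
instance (i : Int) (segmented_paths : List (List String)) : Decidable (Pre_find_permutations_from i segmented_paths) := by unfold Pre_find_permutations_from; infer_instance

def pvWitness_find_permutations_from : Int × List (List String) := (0, [["a", "b"], ["x"]])

def Spec_find_permutations_from (i : Int) (segmented_paths : List (List String)) (out : List String) : Prop := out = find_permutations_from_alt i segmented_paths
instance (i : Int) (segmented_paths : List (List String)) (out : List String) : Decidable (Spec_find_permutations_from i segmented_paths out) := by unfold Spec_find_permutations_from; infer_instance

-- ===== CLAIM (what is proved, stated in full; the proofs are below) =====
def Claim_equal_find_permutations_from : Prop := ∀ (i : Int) (segmented_paths : List (List String)), Dom_find_permutations_from i segmented_paths → Pre_find_permutations_from i segmented_paths → Spec_find_permutations_from i segmented_paths (find_permutations_from i segmented_paths)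

-- ===== LEMMAS AND PROOFS =====

-- A's inner append loop is 'acc ++ map'.
theorem inner_foldl_eq (next : List String) (segment : String) (acc : List String) :
    next.foldl (fun result c => result ++ [segment ++ c]) acc
      = acc ++ next.map (fun c => segment ++ c) := by
  exact PySem.List.foldl_append_singleton_eq_map (fun c => segment ++ c) next acc

-- A's nested loops compute the flatMap B's comprehension computes.
theorem nested_foldl_eq_flatMap (segs next : List String) :
    segs.foldl (fun result segment =>
        next.foldl (fun result c => result ++ [segment ++ c]) result) []
      = segs.flatMap (fun seg => next.map (fun c => seg ++ c)) := by
  have h : ∀ (acc : List String),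
      segs.foldl (fun result segment =>
        next.foldl (fun result c => result ++ [segment ++ c]) result) acc
      = acc ++ segs.flatMap (fun seg => next.map (fun c => seg ++ c)) := by
    induction segs with
    | nil => intro acc; simp
    | cons s ss ih =>
      intro acc
      rw [List.foldl_cons, inner_foldl_eq, ih, List.flatMap_cons, List.append_assoc]
  simpa using h []

-- One backward step of B's loop: the countdown range ends with j = i.
theorem alt_step (i : Int) (sp : List (List String)) (h : i < (sp.length : Int) - 1) :
    find_permutations_from_alt i sp
      = ((PySem.List.pyGet? sp i).getD []).flatMap
          (fun seg => (find_permutations_from_alt (i + 1) sp).map (fun c => seg ++ c)) := by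
  unfold find_permutations_from_alt
  have hr : PySem.List.pyRange ((sp.length : Int) - 2) (i - 1) (-1)
      = PySem.List.pyRange ((sp.length : Int) - 2) i (-1) ++ [i] := by
    rw [PySem.List.pyRange_neg_one_eq_reverse, PySem.List.pyRange_neg_one_eq_reverse]
    rw [show i - 1 + 1 = i by ring]
    rw [PySem.List.pyRange_one_cons (by omega)]
    simp
  rw [hr, List.foldl_append]
  simp

theorem eq_on_pre (i : Int) (sp : List (List String)) (hpre : Pre_find_permutations_from i sp) :
    find_permutations_from i sp = find_permutations_from_alt i sp := by
  obtain ⟨h1, h2⟩ := hpre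
  by_cases hbase : i = (sp.length : Int) - 1
  · -- base case: zero loop iterations in B, last element
    subst hbase
    unfold find_permutations_from find_permutations_from_alt
    rw [if_pos rfl, PySem.List.pyRange_neg_one_eq_nil (by omega), List.foldl_nil]
    have hne : sp ≠ [] := by intro h; subst h; simp at h1
    rw [PySem.List.pyGet?_neg_one]
    rw [show ((sp.length : Int) - 1) = ((sp.length - 1 : Nat) : Int) by
      have : 1 ≤ sp.length := List.length_pos_iff.mpr hne; omega]
    rw [PySem.List.pyGet?_natCast]
    rw [List.getLast?_eq_getElem?]
  · -- step case
    have hlt : i < (sp.length : Int) - 1 := by omega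
    rw [alt_step i sp hlt]
    unfold find_permutations_from
    rw [if_neg hbase, if_pos hlt]
    have ih := eq_on_pre (i + 1) sp ⟨by omega, by omega⟩
    rw [ih, nested_foldl_eq_flatMap]
termination_by ((sp.length : Int) - 1 - i).toNat
decreasing_by omega

-- ===== VERDICT (by name: the statement is the Claim_ definition above) =====
theorem find_permutations_from_spec : Claim_equal_find_permutations_from := by
  intro i sp _ hpre
  unfold Spec_find_permutations_from
  exact eq_on_pre i sp hpre
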